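-- pv_equiv track=rewrite | github.com/kingzing89/AI-ticket-support-agent | src/review.py | _parse_review_result
-- ===== SOURCE A (Python) =====
-- from typing import Dict, Tuple
--
-- def _parse_review_result(review_result: str) -> Tuple[bool, str]:
--     """Parse the LLM review result into approval status and feedback"""
--
--     lines = review_result.strip().split('\n')
--     decision_line = ""
--     feedback_lines = []
--
--     found_decision = False
--     found_feedback = False
--
--     for line in lines:
--         line = line.strip()
--         if line.startswith("DECISION:"):
--             decision_line = line.replace("DECISION:", "").strip()
--             found_decision = True
--         elif line.startswith("FEEDBACK:"):
--             feedback_lines.append(line.replace("FEEDBACK:", "").strip())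
--             found_feedback = True
--         elif found_feedback:
--             # Continue collecting feedback lines
--             feedback_lines.append(line)
--
--     # Determine approval
--     approved = False
--     if found_decision:
--         approved = "APPROVED" in decision_line.upper()
--
--     # Get feedback
--     feedback = " ".join(feedback_lines).strip()
--     if not feedback:
--         if approved:
--             feedback = "Response meets all quality standards and policies."
--         else:
--             feedback = "Response needs improvement. Please revise for better accuracy and helpfulness."
--
--     return approved, feedback
-- ===== SOURCE B (Python) =====
-- def _parse_review_result(review_result):
--     """Parse the LLM review result into approval status and feedback."""
--     lines = [ln.strip() for ln in review_result.strip().split('\n')]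
--
--     # Decision: the last DECISION: line wins.
--     decisions = [ln for ln in lines if ln.startswith("DECISION:")]
--     approved = bool(decisions) and \
--         "APPROVED" in decisions[-1].replace("DECISION:", "").strip().upper()
--
--     # Feedback: locate the first FEEDBACK: line, then walk the tail once.
--     parts = []
--     for i, ln in enumerate(lines):
--         if ln.startswith("FEEDBACK:"):
--             for l in lines[i:]:
--                 if l.startswith("DECISION:"):
--                     continue
--                 elif l.startswith("FEEDBACK:"):
--                     parts.append(l.replace("FEEDBACK:", "").strip())
--                 else:
--                     parts.append(l)
--             break
--
--     feedback = " ".join(parts).strip()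
--     if not feedback:
--         feedback = ("Response meets all quality standards and policies."
--                     if approved else
--                     "Response needs improvement. Please revise for better accuracy and helpfulness.")
--     return approved, feedback
-- ===== Notes on version B (the rewrite author's own statement) =====
-- stated objective: alternative
-- what changed: Replaced A's single flag-driven accumulator loop with a locate-then-slice decomposition: the approval flag comes from the last DECISION: line via a filter, and the feedback is built by finding the first FEEDBACK: index and walking only that tail once.
import Mathlib
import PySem

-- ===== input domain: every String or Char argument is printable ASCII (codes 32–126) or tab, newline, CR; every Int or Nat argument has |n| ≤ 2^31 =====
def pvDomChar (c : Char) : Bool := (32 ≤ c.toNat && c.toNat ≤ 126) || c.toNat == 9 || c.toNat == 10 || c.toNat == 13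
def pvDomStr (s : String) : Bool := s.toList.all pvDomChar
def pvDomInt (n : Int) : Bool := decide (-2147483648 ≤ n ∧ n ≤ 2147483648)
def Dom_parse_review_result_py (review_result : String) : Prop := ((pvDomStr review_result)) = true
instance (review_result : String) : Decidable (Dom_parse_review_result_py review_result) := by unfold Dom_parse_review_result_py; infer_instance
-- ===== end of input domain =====

-- B replaces A's flag-driven single accumulator loop by a locate-then-slice decomposition
-- (last DECISION: line decides the flag; first FEEDBACK: index, then one walk of the tail); objective: alternative.

-- ===== PORT A =====
-- the loop body of A ('line = line.strip()' happens inside, as in A)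
def pvStepA (st : String × List String × Bool × Bool) (line : String) : String × List String × Bool × Bool :=
  let line := PySem.Str.strip line
  if PySem.Str.startswith line "DECISION:" then
    (PySem.Str.strip (PySem.Str.replace line "DECISION:" ""), st.2.1, true, st.2.2.2)
  else if PySem.Str.startswith line "FEEDBACK:" then
    (st.1, st.2.1 ++ [PySem.Str.strip (PySem.Str.replace line "FEEDBACK:" "")], st.2.2.1, true)
  else if st.2.2.2 then
    (st.1, st.2.1 ++ [line], st.2.2.1, st.2.2.2)
  else st

def parse_review_result_py (review_result : String) : Bool × String :=
  -- .split('\n') with a nonempty separator never fails: the .getD [] branch is unreachable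
  let lines := (PySem.Str.split? (PySem.Str.strip review_result) "\n").getD []
  let st := lines.foldl pvStepA ("", [], false, false)
  let approved := if st.2.2.1 then PySem.Str.isIn "APPROVED" (PySem.Str.upper st.1) else false
  let feedback := PySem.Str.strip (PySem.Str.join " " st.2.1)
  let feedback :=
    if feedback = "" then
      if approved then "Response meets all quality standards and policies."
      else "Response needs improvement. Please revise for better accuracy and helpfulness."
    else feedback
  (approved, feedback)

-- ===== PORT B =====
-- the inner tail walk of B (lines are already stripped)
def pvCollectFb : List String → List String
  | [] => []
  | l :: ls =>
    if PySem.Str.startswith l "DECISION:" then pvCollectFb ls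
    else if PySem.Str.startswith l "FEEDBACK:" then
      PySem.Str.strip (PySem.Str.replace l "FEEDBACK:" "") :: pvCollectFb ls
    else l :: pvCollectFb ls

-- 'bool(decisions) and "APPROVED" in decisions[-1].replace(...).strip().upper()'
def pvApprovedOf : Option String → Bool
  | some d => PySem.Str.isIn "APPROVED" (PySem.Str.upper (PySem.Str.strip (PySem.Str.replace d "DECISION:" "")))
  | none => false

-- the find-then-slice: walk the tail from the first FEEDBACK: index (if any)
def pvPartsOf : Option Nat → List String → List String
  | some i, lines => pvCollectFb (lines.drop i)
  | none, _ => []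

def parse_review_result_py_alt (review_result : String) : Bool × String :=
  let lines := ((PySem.Str.split? (PySem.Str.strip review_result) "\n").getD []).map PySem.Str.strip
  let approved := pvApprovedOf (lines.filter (fun l => PySem.Str.startswith l "DECISION:")).getLast?
  let parts := pvPartsOf (lines.findIdx? (fun l => PySem.Str.startswith l "FEEDBACK:")) lines
  let feedback := PySem.Str.strip (PySem.Str.join " " parts)
  let feedback :=
    if feedback = "" then
      if approved then "Response meets all quality standards and policies."
      else "Response needs improvement. Please revise for better accuracy and helpfulness."
    else feedback
  (approved, feedback)

-- ===== PRECONDITION & SPEC =====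
def Spec_parse_review_result_py (review_result : String) (out : Bool × String) : Prop := out = parse_review_result_py_alt review_result
instance (review_result : String) (out : Bool × String) : Decidable (Spec_parse_review_result_py review_result out) := by unfold Spec_parse_review_result_py; infer_instance

-- ===== CLAIM (what is proved, stated in full; the proofs are below) =====
def Claim_equal_parse_review_result_py : Prop := ∀ (review_result : String), Dom_parse_review_result_py review_result → Spec_parse_review_result_py review_result (parse_review_result_py review_result)

-- ===== LEMMAS AND PROOFS =====

-- pvStepA on an already-stripped line (A strips inside the loop; B pre-strips the list)
def pvStepA' (st : String × List String × Bool × Bool) (line : String) : String × List String × Bool × Bool :=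
  if PySem.Str.startswith line "DECISION:" then
    (PySem.Str.strip (PySem.Str.replace line "DECISION:" ""), st.2.1, true, st.2.2.2)
  else if PySem.Str.startswith line "FEEDBACK:" then
    (st.1, st.2.1 ++ [PySem.Str.strip (PySem.Str.replace line "FEEDBACK:" "")], st.2.2.1, true)
  else if st.2.2.2 then
    (st.1, st.2.1 ++ [line], st.2.2.1, st.2.2.2)
  else st

theorem foldl_stepA_eq_map_strip (L : List String) (st : String × List String × Bool × Bool) :
    L.foldl pvStepA st = (L.map PySem.Str.strip).foldl pvStepA' st := by
  rw [List.foldl_map]; rfl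

theorem pvCollectFb_cons (l : String) (ls : List String) :
    pvCollectFb (l :: ls) =
      if PySem.Str.startswith l "DECISION:" then pvCollectFb ls
      else if PySem.Str.startswith l "FEEDBACK:" then
        PySem.Str.strip (PySem.Str.replace l "FEEDBACK:" "") :: pvCollectFb ls
      else l :: pvCollectFb ls := rfl

-- a line cannot start with both "DECISION:" and "FEEDBACK:"
theorem not_both_prefixes (l : String)
    (hD : PySem.Str.startswith l "DECISION:" = true) :
    PySem.Str.startswith l "FEEDBACK:" = false := by
  cases hF : PySem.Str.startswith l "FEEDBACK:" with
  | false => rfl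
  | true =>
    exfalso
    rw [PySem.Str.startswith_eq, PySem.Chars.startswith_iff] at hD hF
    obtain ⟨t1, h1⟩ := hD
    obtain ⟨t2, h2⟩ := hF
    have e : "DECISION:".toList ++ t1 = "FEEDBACK:".toList ++ t2 := h1.trans h2.symm
    have d1 : "DECISION:".toList = 'D' :: "ECISION:".toList := by decide
    have d2 : "FEEDBACK:".toList = 'F' :: "EEDBACK:".toList := by decide
    rw [d1, d2] at e
    simp at e

-- decision components (.1 and .2.2.1) of A's fold = last DECISION: line of L
theorem fold_decision (L : List String) (st : String × List String × Bool × Bool) :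
    ((L.foldl pvStepA' st).1, (L.foldl pvStepA' st).2.2.1) =
      ((L.filter (fun l => PySem.Str.startswith l "DECISION:")).getLast?).elim
        (st.1, st.2.2.1)
        (fun d => (PySem.Str.strip (PySem.Str.replace d "DECISION:" ""), true)) := by
  induction L generalizing st with
  | nil => rfl
  | cons l ls ih =>
    rw [List.foldl_cons, List.filter_cons, ih]
    cases hD : PySem.Str.startswith l "DECISION:" with
    | true =>
      simp only [if_true, List.getLast?_cons]
      cases hg : (ls.filter (fun l => PySem.Str.startswith l "DECISION:")).getLast? with
      | some d => simp only [Option.getD_some, Option.elim_some]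
      | none =>
        simp only [Option.getD_none, Option.elim_some, Option.elim_none]
        simp only [pvStepA', hD, if_true]
    | false =>
      simp only [Bool.false_eq_true, if_false]
      cases hg : (ls.filter (fun l => PySem.Str.startswith l "DECISION:")).getLast? with
      | some d => simp only [Option.elim_some]
      | none =>
        simp only [Option.elim_none]
        simp only [pvStepA', hD, Bool.false_eq_true, if_false]
        cases hF : PySem.Str.startswith l "FEEDBACK:" with
        | true => simp only [if_true]
        | false =>
          simp only [Bool.false_eq_true, if_false]
          cases hff : st.2.2.2 with
          | true => simp only [if_true]
          | false => simp only [Bool.false_eq_true, if_false]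

theorem fold_decision_fst (L : List String) (st : String × List String × Bool × Bool) :
    (L.foldl pvStepA' st).1 =
      ((L.filter (fun l => PySem.Str.startswith l "DECISION:")).getLast?).elim st.1
        (fun d => PySem.Str.strip (PySem.Str.replace d "DECISION:" "")) := by
  have h := fold_decision L st
  cases hg : (L.filter (fun l => PySem.Str.startswith l "DECISION:")).getLast? with
  | some d => rw [hg, Option.elim_some] at h; rw [Option.elim_some]; exact (Prod.mk.injEq _ _ _ _ ▸ h).1
  | none => rw [hg, Option.elim_none] at h; rw [Option.elim_none]; exact (Prod.mk.injEq _ _ _ _ ▸ h).1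

theorem fold_decision_flag (L : List String) (st : String × List String × Bool × Bool) :
    (L.foldl pvStepA' st).2.2.1 =
      ((L.filter (fun l => PySem.Str.startswith l "DECISION:")).getLast?).elim st.2.2.1
        (fun _ => true) := by
  have h := fold_decision L st
  cases hg : (L.filter (fun l => PySem.Str.startswith l "DECISION:")).getLast? with
  | some d => rw [hg, Option.elim_some] at h; rw [Option.elim_some]; exact (Prod.mk.injEq _ _ _ _ ▸ h).2
  | none => rw [hg, Option.elim_none] at h; rw [Option.elim_none]; exact (Prod.mk.injEq _ _ _ _ ▸ h).2

-- feedback-list component (.2.1) of A's fold = B's find-then-slice collection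
theorem fold_feedback (L : List String) (st : String × List String × Bool × Bool) :
    (L.foldl pvStepA' st).2.1 =
      st.2.1 ++
        (if st.2.2.2 then pvCollectFb L
         else pvPartsOf (L.findIdx? (fun l => PySem.Str.startswith l "FEEDBACK:")) L) := by
  induction L generalizing st with
  | nil =>
    cases h : st.2.2.2 with
    | true => simp only [List.foldl_nil, if_true, pvCollectFb, List.append_nil]
    | false => simp only [List.foldl_nil, Bool.false_eq_true, if_false, List.findIdx?_nil,
        pvPartsOf, List.append_nil]
  | cons l ls ih =>
    rw [List.foldl_cons, ih, List.findIdx?_cons]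
    cases hD : PySem.Str.startswith l "DECISION:" with
    | true =>
      have hF := not_both_prefixes l hD
      simp only [pvStepA', hD, if_true, pvCollectFb_cons, hF, Bool.false_eq_true, if_false]
      cases h : st.2.2.2 with
      | true => simp only [if_true]
      | false =>
        simp only [Bool.false_eq_true, if_false]
        cases hid : ls.findIdx? (fun l => PySem.Str.startswith l "FEEDBACK:") with
        | some i => simp only [Option.map_some, pvPartsOf, List.drop_succ_cons]
        | none => simp only [Option.map_none, pvPartsOf]
    | false =>
      cases hF : PySem.Str.startswith l "FEEDBACK:" with
      | true =>
        simp only [pvStepA', hD, Bool.false_eq_true, if_false, hF, if_true]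
        cases h : st.2.2.2 with
        | true =>
          simp only [if_true, pvCollectFb_cons, hD, Bool.false_eq_true, if_false, hF,
            List.append_assoc, List.singleton_append]
        | false =>
          simp only [if_true, Bool.false_eq_true, if_false, pvPartsOf, List.drop_zero,
            pvCollectFb_cons, hD, hF, List.append_assoc, List.singleton_append]
      | false =>
        simp only [pvStepA', hD, Bool.false_eq_true, if_false, hF]
        cases h : st.2.2.2 with
        | true =>
          simp only [if_true, pvCollectFb_cons, hD, Bool.false_eq_true, if_false, hF,
            List.append_assoc, List.singleton_append]
        | false =>
          simp only [h, Bool.false_eq_true, if_false]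
          cases hid : ls.findIdx? (fun l => PySem.Str.startswith l "FEEDBACK:") with
          | some i => simp only [Option.map_some, pvPartsOf, List.drop_succ_cons]
          | none => simp only [Option.map_none, pvPartsOf]

-- ===== VERDICT (by name: the statement is the Claim_ definition above) =====
set_option maxHeartbeats 1000000 in
theorem parse_review_result_py_spec : Claim_equal_parse_review_result_py := by
  intro review_result _
  unfold Spec_parse_review_result_py
  simp only [parse_review_result_py, parse_review_result_py_alt]
  rw [foldl_stepA_eq_map_strip]
  set L := ((PySem.Str.split? (PySem.Str.strip review_result) "\n").getD []).map PySem.Str.strip with hL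
  have hfb : (L.foldl pvStepA' ("", [], false, false)).2.1 =
      pvPartsOf (L.findIdx? (fun l => PySem.Str.startswith l "FEEDBACK:")) L := by
    have h := fold_feedback L ("", [], false, false)
    simp only [Bool.false_eq_true, if_false, List.nil_append] at h
    exact h
  have happ :
      (if (L.foldl pvStepA' ("", [], false, false)).2.2.1 then
          PySem.Str.isIn "APPROVED" (PySem.Str.upper (L.foldl pvStepA' ("", [], false, false)).1)
        else false) =
      pvApprovedOf (L.filter (fun l => PySem.Str.startswith l "DECISION:")).getLast? := by
    have e1 := fold_decision_fst L ("", [], false, false)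
    have e2 := fold_decision_flag L ("", [], false, false)
    cases hg : (L.filter (fun l => PySem.Str.startswith l "DECISION:")).getLast? with
    | some d =>
      rw [hg, Option.elim_some] at e1 e2
      rw [e1, e2, if_pos rfl]; rfl
    | none =>
      rw [hg, Option.elim_none] at e1 e2
      rw [e2]; rfl
  rw [hfb, happ]
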